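-- pv_equiv track=rewrite | github.com/dgyarmati/algorithms-and-data-structs | src/python/codingame/easy_chuck_norris/chuck_norris_v2.py | create_unary_string
-- ===== SOURCE A (Python) =====
-- def create_unary_string(binary_with_separators_list):
--     unary_string = ""
--     first_of_batch = True
--     for char in binary_with_separators_list:
--         if char == "1":
--             chars = "0 0" if first_of_batch else "0"
--             unary_string += chars
--             first_of_batch = False
--         elif char == "0":
--             chars = "00 0" if first_of_batch else "0"
--             unary_string += chars
--             first_of_batch = False
--         elif char == ":":
--             unary_string += " "
--             first_of_batch = True
--     return unary_string
-- ===== SOURCE B (Python) =====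
-- def create_unary_string(binary_with_separators_list):
--     # First pass: split into bit groups at ':' (ignoring other characters).
--     done = []
--     cur = []
--     for ch in binary_with_separators_list:
--         if ch == ':':
--             done.append(cur)
--             cur = []
--         elif ch == '0' or ch == '1':
--             cur.append(ch)
--     groups = done + [cur]
--     # Second pass: encode each group; empty groups encode as ''.
--     parts = []
--     for g in groups:
--         if not g:
--             parts.append('')
--         else:
--             header = '0' if g[0] == '1' else '00'
--             parts.append(header + ' ' + '0' * len(g))
--     return ' '.join(parts)
-- ===== Notes on version B (the rewrite author's own statement) =====
-- stated objective: alternative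
-- what changed: B replaces A's single pass with a running output string and a first-of-batch flag by a two-pass group decomposition: first split the input into bit groups at the separator characters, then encode each group from its first bit and its length and join the encodings with single spaces.
import Mathlib
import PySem

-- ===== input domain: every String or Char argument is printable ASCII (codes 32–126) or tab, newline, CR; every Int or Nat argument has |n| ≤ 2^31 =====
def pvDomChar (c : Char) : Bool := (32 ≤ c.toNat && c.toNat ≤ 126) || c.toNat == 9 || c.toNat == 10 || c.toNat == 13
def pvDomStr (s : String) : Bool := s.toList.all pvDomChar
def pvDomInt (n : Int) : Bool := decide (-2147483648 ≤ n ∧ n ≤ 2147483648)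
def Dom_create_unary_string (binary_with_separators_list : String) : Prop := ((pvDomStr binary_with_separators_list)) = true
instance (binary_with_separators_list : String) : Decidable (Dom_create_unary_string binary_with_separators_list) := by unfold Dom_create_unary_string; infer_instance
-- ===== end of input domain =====

-- B replaces A's single pass (running string + first-of-batch flag) by a two-pass
-- group decomposition: split at ':' into bit groups, then encode each group and join.

-- ===== PORT A =====
-- one loop step of A: the running unary string and the first_of_batch flag
def csStepA (st : String × Bool) (c : Char) : String × Bool :=
  if c = '1' then (st.1 ++ (if st.2 then "0 0" else "0"), false)
  else if c = '0' then (st.1 ++ (if st.2 then "00 0" else "0"), false)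
  else if c = ':' then (st.1 ++ " ", true)
  else st

def create_unary_string (binary_with_separators_list : String) : String :=
  (binary_with_separators_list.toList.foldl csStepA ("", true)).1

-- ===== PORT B =====
-- first pass step: split into bit groups at ':' (other characters ignored)
def csStepB (st : List (List Char) × List Char) (c : Char) : List (List Char) × List Char :=
  if c = ':' then (st.1 ++ [st.2], [])
  else if c = '0' ∨ c = '1' then (st.1, st.2 ++ [c])
  else st

-- second pass: encode one group (header from the first bit, body from the length)
def csEnc (g : List Char) : List Char :=
  if g = [] then []
  else (if g.headD ' ' = '1' then ['0'] else ['0', '0']) ++ [' '] ++ List.replicate g.length '0'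

-- ' '.join over char lists
def csJoin : List (List Char) → List Char
  | [] => []
  | [g] => g
  | g :: gs => g ++ ' ' :: csJoin gs

def create_unary_string_alt (binary_with_separators_list : String) : String :=
  let st := binary_with_separators_list.toList.foldl csStepB ([], [])
  String.ofList (csJoin ((st.1 ++ [st.2]).map csEnc))

-- ===== PRECONDITION & SPEC =====
def Spec_create_unary_string (binary_with_separators_list : String) (out : String) : Prop := out = create_unary_string_alt binary_with_separators_list
instance (binary_with_separators_list : String) (out : String) : Decidable (Spec_create_unary_string binary_with_separators_list out) := by unfold Spec_create_unary_string; infer_instance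

-- ===== CLAIM (what is proved, stated in full; the proofs are below) =====
def Claim_equal_create_unary_string : Prop := ∀ (binary_with_separators_list : String), Dom_create_unary_string binary_with_separators_list → Spec_create_unary_string binary_with_separators_list (create_unary_string binary_with_separators_list)

-- ===== LEMMAS AND PROOFS =====

-- char-list version of A's loop step (proof helper)
def csStepAc (st : List Char × Bool) (c : Char) : List Char × Bool :=
  if c = '1' then (st.1 ++ (if st.2 then ['0', ' ', '0'] else ['0']), false)
  else if c = '0' then (st.1 ++ (if st.2 then ['0', '0', ' ', '0'] else ['0']), false)
  else if c = ':' then (st.1 ++ [' '], true)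
  else st

theorem csFoldA_char (l : List Char) : ∀ (u : String) (b : Bool),
    l.foldl csStepA (u, b) = (String.ofList (l.foldl csStepAc (u.toList, b)).1, (l.foldl csStepAc (u.toList, b)).2) := by
  induction l with
  | nil => intro u b; simp [String.ofList_toList]
  | cons c l ih =>
    intro u b
    simp only [List.foldl_cons, csStepA, csStepAc]
    split_ifs with h1 h2 h3 <;> simp [ih]

theorem csJoin_append (zs : List (List Char)) (y δ : List Char) :
    csJoin (zs ++ [y ++ δ]) = csJoin (zs ++ [y]) ++ δ := by
  induction zs with
  | nil => simp [csJoin]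
  | cons z zs ih =>
    cases zs with
    | nil => simp [csJoin]
    | cons w ws => simp [csJoin] at ih ⊢; simp [ih]

theorem csJoin_colon (zs : List (List Char)) (y : List Char) :
    csJoin (zs ++ [y] ++ [[]]) = csJoin (zs ++ [y]) ++ [' '] := by
  induction zs with
  | nil => simp [csJoin]
  | cons z zs ih =>
    cases zs with
    | nil => simp [csJoin]
    | cons w ws => simp [csJoin] at ih ⊢; simp [ih]

theorem csEnc_bit (g : List Char) (c : Char) (hc : c = '0' ∨ c = '1') :
    csEnc (g ++ [c]) =
      csEnc g ++ (if g = [] then (if c = '1' then ['0'] else ['0', '0']) ++ [' ', '0'] else ['0']) := by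
  cases g with
  | nil => rcases hc with h | h <;> subst h <;> simp [csEnc]
  | cons x xs =>
    simp [csEnc, List.replicate_succ']

theorem csMain (l : List Char) : ∀ (done : List (List Char)) (cur : List Char),
    (l.foldl csStepAc (csJoin ((done ++ [cur]).map csEnc), cur.isEmpty)).1
      = csJoin (((l.foldl csStepB (done, cur)).1 ++ [(l.foldl csStepB (done, cur)).2]).map csEnc) := by
  induction l with
  | nil => intro done cur; simp
  | cons c l ih =>
    intro done cur
    simp only [List.foldl_cons, csStepAc, csStepB]
    by_cases h1 : c = '1'
    · subst h1
      have hrw : csJoin ((done ++ [cur ++ ['1']]).map csEnc)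
          = csJoin ((done ++ [cur]).map csEnc) ++ (if cur.isEmpty then ['0', ' ', '0'] else ['0']) := by
        simp only [List.map_append, List.map_cons, List.map_nil,
          csEnc_bit cur '1' (Or.inr rfl)]
        rw [csJoin_append]
        cases cur <;> simp
      have h := ih done (cur ++ ['1'])
      rw [show (cur ++ ['1']).isEmpty = false from by cases cur <;> rfl] at h
      rw [hrw] at h
      simp at h
      simpa using h
    · by_cases h2 : c = '0'
      · subst h2
        have hrw : csJoin ((done ++ [cur ++ ['0']]).map csEnc)
            = csJoin ((done ++ [cur]).map csEnc) ++ (if cur.isEmpty then ['0', '0', ' ', '0'] else ['0']) := by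
          simp only [List.map_append, List.map_cons, List.map_nil,
            csEnc_bit cur '0' (Or.inl rfl)]
          rw [csJoin_append]
          cases cur <;> simp
        have h := ih done (cur ++ ['0'])
        rw [show (cur ++ ['0']).isEmpty = false from by cases cur <;> rfl] at h
        rw [hrw] at h
        simp at h
        simpa using h
      · by_cases h3 : c = ':'
        · subst h3
          have hrw : csJoin (((done ++ [cur]) ++ [([] : List Char)]).map csEnc)
              = csJoin ((done ++ [cur]).map csEnc) ++ [' '] := by
            have := csJoin_colon (done.map csEnc) (csEnc cur)
            simpa [csEnc] using this
          have h := ih (done ++ [cur]) []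
          rw [hrw] at h
          simpa [csEnc] using h
        · have hor : ¬ (c = '0' ∨ c = '1') := by rintro (h | h); exacts [h2 h, h1 h]
          simp only [if_neg h1, if_neg h2, if_neg h3, if_neg hor]
          exact ih done cur

-- ===== VERDICT (by name: the statement is the Claim_ definition above) =====
theorem create_unary_string_spec : Claim_equal_create_unary_string := by
  intro s _
  unfold Spec_create_unary_string create_unary_string create_unary_string_alt
  rw [csFoldA_char]
  have h := csMain s.toList [] []
  refine congrArg String.ofList ?_
  simpa [csJoin, csEnc] using h
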